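-- pv_equiv track=rewrite | github.com/always97/algorithm | BOJ/Silver/1966.py | myTurn
-- ===== SOURCE A (Python) =====
-- def myTurn(arr) :
--   first_element = arr[0][0];
--   found = False;
--   for element in arr:
--       if element[0] > first_element:
--           found = True;
--           break
--
--   return found
-- ===== SOURCE B (Python) =====
-- def myTurn(arr):
--     first = arr[0][0]
--     top = sorted((x[0] for x in arr), reverse=True)[0]
--     return top > first
-- ===== Notes on version B (the rewrite author's own statement) =====
-- stated objective: alternative
-- what changed: Replaces the short-circuit search-with-break and boolean flag by sorting the priorities in descending order and comparing the largest (the sorted head) with the first element's priority.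
import Mathlib
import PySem

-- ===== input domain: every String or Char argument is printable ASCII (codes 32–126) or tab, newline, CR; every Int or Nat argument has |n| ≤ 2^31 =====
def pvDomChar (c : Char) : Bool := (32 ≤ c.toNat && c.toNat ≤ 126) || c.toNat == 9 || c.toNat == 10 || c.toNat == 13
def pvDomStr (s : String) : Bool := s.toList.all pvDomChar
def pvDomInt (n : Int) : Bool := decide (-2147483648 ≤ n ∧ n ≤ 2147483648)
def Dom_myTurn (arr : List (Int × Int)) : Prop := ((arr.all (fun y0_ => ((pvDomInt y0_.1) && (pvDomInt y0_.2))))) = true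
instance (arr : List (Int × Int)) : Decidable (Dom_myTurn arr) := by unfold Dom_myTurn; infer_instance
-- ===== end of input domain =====

-- ===== PORT A =====

-- B replaces A's flagged short-circuit search by sorting the priorities descending and comparing the sorted head to the first element's priority (objective: alternative).

-- ===== PORT A =====
-- the for-loop with break: scan elements, return true at the first priority above first_element
def myTurnLoop (firstElement : Int) : List (Int × Int) → Bool
  | [] => false
  | e :: rest => if e.1 > firstElement then true else myTurnLoop firstElement rest

def myTurn (arr : List (Int × Int)) : Bool :=
  match arr with
  | [] => false   -- unreachable under Pre_: arr[0][0] raises IndexError on []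
  | h :: t => myTurnLoop h.1 (h :: t)

-- ===== PORT B =====
def myTurn_alt (arr : List (Int × Int)) : Bool :=
  match arr with
  | [] => false   -- unreachable under Pre_: arr[0][0] raises IndexError on []
  | h :: t =>
    -- sorted((x[0] for x in arr), reverse=True)[0] > first
    match PySem.List.sorted ((h :: t).map (fun x => x.1)) (fun x => x) true with
    | [] => false   -- unreachable: sorted of a nonempty list is nonempty
    | top :: _ => decide (top > h.1)

-- ===== PRECONDITION & SPEC =====
-- Pre_ excludes only the empty list, on which A raises IndexError.
def Pre_myTurn (arr : List (Int × Int)) : Prop := arr ≠ []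
instance (arr : List (Int × Int)) : Decidable (Pre_myTurn arr) := by unfold Pre_myTurn; infer_instance
def pvWitness_myTurn : (List (Int × Int)) := [(1, 2), (3, 4)]

def Spec_myTurn (arr : List (Int × Int)) (out : Bool) : Prop := out = myTurn_alt arr
instance (arr : List (Int × Int)) (out : Bool) : Decidable (Spec_myTurn arr out) := by unfold Spec_myTurn; infer_instance

-- ===== CLAIM (what is proved, stated in full; the proofs are below) =====
def Claim_equal_myTurn : Prop := ∀ (arr : List (Int × Int)), Dom_myTurn arr → Pre_myTurn arr → Spec_myTurn arr (myTurn arr)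

-- ===== LEMMAS AND PROOFS =====

-- A's loop decides "some priority exceeds f"
theorem myTurnLoop_eq_any (f : Int) (l : List (Int × Int)) :
    myTurnLoop f l = l.any (fun e => decide (e.1 > f)) := by
  induction l with
  | nil => rfl
  | cons e rest ih =>
    simp only [myTurnLoop, List.any_cons]
    by_cases h : e.1 > f <;> simp [h, ih]

-- ===== VERDICT (by name: the statement is the Claim_ definition above) =====
theorem myTurn_spec : Claim_equal_myTurn := by
  intro arr _ hpre
  unfold Spec_myTurn myTurn myTurn_alt
  match arr with
  | [] => exact absurd rfl hpre
  | h :: t =>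
    dsimp only
    rw [myTurnLoop_eq_any]
    cases hs : PySem.List.sorted ((h :: t).map (fun x => x.1)) (fun x => x) true with
    | nil =>
      exact absurd ((PySem.List.sorted_eq_nil_iff _ _ _).mp hs) (by simp)
    | cons top rest =>
      have htopge : ∀ y ∈ (h :: t).map (fun x => x.1), y ≤ top :=
        PySem.List.key_head_sorted_rev_ge _ (fun x => x) hs
      have htopmem : top ∈ (h :: t).map (fun x => x.1) := by
        have : top ∈ PySem.List.sorted ((h :: t).map (fun x => x.1)) (fun x => x) true := by
          rw [hs]; exact List.mem_cons_self
        exact (PySem.List.mem_sorted _ _ _ _).mp this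
      rcases List.mem_map.mp htopmem with ⟨e, he, rfl⟩
      by_cases hgt : e.1 > h.1
      · simp only [decide_eq_true hgt]
        exact List.any_eq_true.mpr ⟨e, he, decide_eq_true hgt⟩
      · simp only [decide_eq_false hgt]
        rw [List.any_eq_false]
        intro x hx
        simp only [decide_eq_true_eq]
        intro hx1
        exact hgt (lt_of_lt_of_le hx1 (htopge x.1 (List.mem_map.mpr ⟨x, hx, rfl⟩)))
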